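-- pv_equiv track=rewrite | github.com/ScrollPrize/villa | ink-detection/tifxyz_dataset/augmentation.py | compute_equal_length_mirror_axes
-- ===== SOURCE A (Python) =====
-- from typing import Sequence
--
-- def compute_equal_length_mirror_axes(patch_size: Sequence[int]) -> tuple[int, ...]:
--     dims = tuple(int(v) for v in patch_size)
--     if len(dims) != 3:
--         raise ValueError(f"Expected a 3D patch size, got {dims!r}")
--
--     allowed_axes: set[int] = set()
--     for left in range(len(dims)):
--         for right in range(left + 1, len(dims)):
--             if dims[left] == dims[right]:
--                 allowed_axes.add(left)
--                 allowed_axes.add(right)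
--     return tuple(sorted(allowed_axes))
-- ===== SOURCE B (Python) =====
-- def compute_equal_length_mirror_axes(patch_size):
--     dims = tuple(int(v) for v in patch_size)
--     if len(dims) != 3:
--         raise ValueError(f"Expected a 3D patch size, got {dims!r}")
--     counts = {}
--     for v in dims:
--         counts[v] = counts.get(v, 0) + 1
--     return tuple(i for i, v in enumerate(dims) if counts[v] > 1)
-- ===== Notes on version B (the rewrite author's own statement) =====
-- stated objective: simpler
-- what changed: Replaced the O(n^2) pairwise double loop accumulating into a set (then sorted) with a one-pass frequency table followed by a single enumerate pass keeping axes whose length value occurs more than once (already in increasing order, so no sort).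
import Mathlib
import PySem

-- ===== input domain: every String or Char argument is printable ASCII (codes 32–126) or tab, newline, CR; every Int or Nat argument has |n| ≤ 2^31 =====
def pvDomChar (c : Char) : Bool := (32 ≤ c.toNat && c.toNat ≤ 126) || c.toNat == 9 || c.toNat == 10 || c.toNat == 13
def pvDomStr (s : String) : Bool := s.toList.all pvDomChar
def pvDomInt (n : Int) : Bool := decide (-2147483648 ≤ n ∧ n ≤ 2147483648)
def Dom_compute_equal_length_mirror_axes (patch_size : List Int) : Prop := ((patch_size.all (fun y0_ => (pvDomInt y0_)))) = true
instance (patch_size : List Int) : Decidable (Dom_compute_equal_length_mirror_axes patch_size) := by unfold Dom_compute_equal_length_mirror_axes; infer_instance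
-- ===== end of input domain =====

-- B replaces A's pairwise double loop over a set with a frequency table and one enumerate pass (simpler).

-- ===== PORT A =====
def compute_equal_length_mirror_axes (patch_size : List Int) : List Int :=
  let dims := patch_size
  let allowed : PySem.Set Int :=
    (PySem.List.pyRange 0 (dims.length : Int) 1).foldl (fun s left =>
      (PySem.List.pyRange (left + 1) (dims.length : Int) 1).foldl (fun s right =>
        if PySem.List.pyGet? dims left = PySem.List.pyGet? dims right then
          PySem.Set.add (PySem.Set.add s left) right
        else s) s) PySem.Set.empty
  PySem.List.sorted allowed (fun x => x) false

-- ===== PORT B =====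
def compute_equal_length_mirror_axes_alt (patch_size : List Int) : List Int :=
  let dims := patch_size
  let counts : PySem.Dict Int Int :=
    dims.foldl (fun d v => d.insert v (d.getD v 0 + 1)) PySem.Dict.empty
  ((PySem.List.enumerate dims).filter (fun iv => counts.getD iv.2 0 > 1)).map (fun iv => iv.1)

-- ===== PRECONDITION & SPEC =====
-- Pre_ excludes exactly the inputs where A raises ValueError: lists whose length is not 3.
def Pre_compute_equal_length_mirror_axes (patch_size : List Int) : Prop := patch_size.length = 3
instance (patch_size : List Int) : Decidable (Pre_compute_equal_length_mirror_axes patch_size) := by unfold Pre_compute_equal_length_mirror_axes; infer_instance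
def pvWitness_compute_equal_length_mirror_axes : List Int := [4, 4, 7]

def Spec_compute_equal_length_mirror_axes (patch_size : List Int) (out : List Int) : Prop := out = compute_equal_length_mirror_axes_alt patch_size
instance (patch_size : List Int) (out : List Int) : Decidable (Spec_compute_equal_length_mirror_axes patch_size out) := by unfold Spec_compute_equal_length_mirror_axes; infer_instance

-- ===== CLAIM (what is proved, stated in full; the proofs are below) =====
def Claim_equal_compute_equal_length_mirror_axes : Prop := ∀ (patch_size : List Int), Dom_compute_equal_length_mirror_axes patch_size → Pre_compute_equal_length_mirror_axes patch_size → Spec_compute_equal_length_mirror_axes patch_size (compute_equal_length_mirror_axes patch_size)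

-- ===== LEMMAS AND PROOFS =====
theorem pvR03 : PySem.List.pyRange 0 3 1 = [0, 1, 2] := by decide
theorem pvR13 : PySem.List.pyRange 1 3 1 = [1, 2] := by decide
theorem pvR23 : PySem.List.pyRange 2 3 1 = [2] := by decide

-- ===== VERDICT (by name: the statement is the Claim_ definition above) =====
set_option maxHeartbeats 2000000 in
theorem compute_equal_length_mirror_axes_spec : Claim_equal_compute_equal_length_mirror_axes := by
  intro ps _ hpre
  unfold Pre_compute_equal_length_mirror_axes at hpre
  unfold Spec_compute_equal_length_mirror_axes
  match ps, hpre with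
  | [a, b, c], _ =>
    by_cases hab : a = b <;> by_cases hac : a = c <;> by_cases hbc : b = c <;>
      simp_all [compute_equal_length_mirror_axes, compute_equal_length_mirror_axes_alt,
        pvR03, pvR13, pvR23, PySem.List.pyGet?, PySem.List.pyIdx?, PySem.Set.add,
        PySem.Set.empty, PySem.Set.contains, PySem.List.sorted, PySem.List.insertBy,
        PySem.List.enumerate, PySem.Dict.insert, PySem.Dict.getD, PySem.Dict.get?,
        PySem.Dict.empty, List.filter, List.foldl]
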